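-- pv_equiv track=rewrite | github.com/elielbarros/pythonStudy | section4_intermediary/exercise_4.py | get_all_best_case
-- ===== SOURCE A (Python) =====
-- def get_number_best_case(list_):
--     if list_:
--         previous_best_case = list_[0]
--         for element in list_:
--             if element['difference'] < previous_best_case['difference']:
--                 previous_best_case = element
--
--         return previous_best_case
--
-- def get_best_case(left_value, left, next_, array_):
--     list_ = []
--     while next_ < len(array_):
--         if array_[next_] == left_value:
--             difference = next_ - left
--             best_case = {
--                 'left': left,
--                 'next_': next_,
--                 'left_value': left_value,
--                 'difference': difference
--             }
--             list_.append(best_case)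
--             if difference == 1:
--                 list_.clear()
--                 list_.append(best_case)
--         next_ += 1
--
--     return get_number_best_case(list_)
--
-- def get_all_best_case(array_):
--     list_ = []
--     for index, value in enumerate(array_):
--         left = index
--         left_value = value
--         next_ = index + 1
--         best_case = get_best_case(left_value, left, next_, array_)
--         if best_case:
--             list_.append(best_case)
--     return list_
-- ===== SOURCE B (Python) =====
-- def get_all_best_case(array_):
--     # One right-to-left pass: for each value remember the nearest index to its right.
--     result = []
--     last_seen = {}
--     for i in range(len(array_) - 1, -1, -1):
--         v = array_[i]
--         j = last_seen.get(v)
--         if j is not None: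
--             result.append({
--                 'left': i,
--                 'next_': j,
--                 'left_value': v,
--                 'difference': j - i
--             })
--         last_seen[v] = i
--     result.reverse()
--     return result
-- ===== Notes on version B (the rewrite author's own statement) =====
-- stated objective: faster
-- what changed: Replaced the per-index forward scan plus minimum-selection (O(n^2)) by a single right-to-left pass that keeps, in a dict, the nearest later index of each value, building each record directly.
import Mathlib
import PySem

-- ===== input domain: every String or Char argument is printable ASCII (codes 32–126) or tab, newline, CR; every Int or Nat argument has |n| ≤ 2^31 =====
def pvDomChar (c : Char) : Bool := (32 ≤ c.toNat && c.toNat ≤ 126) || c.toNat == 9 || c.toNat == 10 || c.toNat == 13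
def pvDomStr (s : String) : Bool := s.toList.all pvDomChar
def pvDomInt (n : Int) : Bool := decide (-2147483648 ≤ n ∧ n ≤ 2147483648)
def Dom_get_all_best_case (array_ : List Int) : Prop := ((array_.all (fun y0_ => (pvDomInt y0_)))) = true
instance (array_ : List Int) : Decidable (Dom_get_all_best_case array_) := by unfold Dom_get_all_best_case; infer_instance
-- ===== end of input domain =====

-- B replaces A's per-index forward scan + minimum selection (O(n^2)) by one right-to-left
-- pass storing each value's nearest later index in a dict (O(n)); same return value.

-- ===== PORT A =====
-- the dicts A builds, as insertion-ordered association lists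
def pvMk (left next_ left_value difference : Int) : List (String × Int) :=
  [("left", left), ("next_", next_), ("left_value", left_value), ("difference", difference)]

-- element['difference']; KeyError unreachable: every dict built by A carries the key
def pvDiff (d : List (String × Int)) : Int := (PySem.Dict.mk d).getD "difference" 0

-- get_number_best_case: first element with minimal 'difference' (None on empty list)
def get_number_best_case (list_ : List (List (String × Int))) : Option (List (String × Int)) :=
  match list_ with
  | [] => none
  | h :: _ =>
    some (list_.foldl (fun prev e => if pvDiff e < pvDiff prev then e else prev) h)

-- the while-loop of get_best_case; indices are Nat (nonnegative at every call);
-- array_[next_] is exact under the guard next_ < len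
def get_best_case_loop (left_value : Int) (left next_ : Nat) (array_ : List Int)
    (list_ : List (List (String × Int))) : List (List (String × Int)) :=
  if _h : next_ < array_.length then
    let list' :=
      if array_.getD next_ 0 = left_value then
        let difference : Int := (next_ : Int) - (left : Int)
        let best := pvMk (left : Int) (next_ : Int) left_value difference
        let l2 := list_ ++ [best]
        if difference = 1 then [best] else l2
      else list_
    get_best_case_loop left_value left (next_ + 1) array_ list'
  else list_
termination_by array_.length - next_

def get_best_case (left_value : Int) (left next_ : Nat) (array_ : List Int) :
    Option (List (String × Int)) :=
  get_number_best_case (get_best_case_loop left_value left next_ array_ [])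

def get_all_best_case (array_ : List Int) : List (List (String × Int)) :=
  (List.range array_.length).foldl
    (fun list_ index =>
      match get_best_case (array_.getD index 0) index (index + 1) array_ with
      | some best_case => list_ ++ [best_case]
      | none => list_)
    []

-- ===== PORT B =====
-- one pass over the reversed list, idx = current Python index; last_seen maps a value to
-- its nearest index to the right; result appended then reversed, as in Source B
def pvAltLoop (l : List Int) (idx : Int) (last_seen : PySem.Dict Int Int)
    (result : List (List (String × Int))) : List (List (String × Int)) :=
  match l with
  | [] => result
  | v :: rest =>
    let result' :=
      match last_seen.get? v with
      | some j => result ++ [pvMk idx j v (j - idx)]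
      | none => result
    pvAltLoop rest (idx - 1) (last_seen.insert v idx) result'

def get_all_best_case_alt (array_ : List Int) : List (List (String × Int)) :=
  (pvAltLoop array_.reverse ((array_.length : Int) - 1) PySem.Dict.empty []).reverse

-- ===== PRECONDITION & SPEC =====
def Spec_get_all_best_case (array_ : List Int) (out : List (List (String × Int))) : Prop := out = get_all_best_case_alt array_
instance (array_ : List Int) (out : List (List (String × Int))) : Decidable (Spec_get_all_best_case array_ out) := by unfold Spec_get_all_best_case; infer_instance

-- ===== CLAIM (what is proved, stated in full; the proofs are below) =====
def Claim_equal_get_all_best_case : Prop := ∀ (array_ : List Int), Dom_get_all_best_case array_ → Spec_get_all_best_case array_ (get_all_best_case array_)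

-- ===== LEMMAS AND PROOFS =====

-- first index j ≥ m with array_[j] = v
def pvFirst (array_ : List Int) (v : Int) (m : Nat) : Option Nat :=
  if _h : m < array_.length then
    if array_.getD m 0 = v then some m else pvFirst array_ v (m + 1)
  else none
termination_by array_.length - m

-- the common specification both ports are reduced to
def pvSpecEntry (array_ : List Int) (i : Nat) : Option (List (String × Int)) :=
  (pvFirst array_ (array_.getD i 0) (i + 1)).map
    (fun j : Nat => pvMk (i : Int) (j : Int) (array_.getD i 0) ((j : Int) - (i : Int)))

def pvSpecOut (array_ : List Int) : List (List (String × Int)) :=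
  (List.range array_.length).filterMap (pvSpecEntry array_)

-- the full match list A's while-loop accumulates
def pvMs (v : Int) (left m : Nat) (array_ : List Int) : List (List (String × Int)) :=
  if _h : m < array_.length then
    (if array_.getD m 0 = v then [pvMk (left : Int) (m : Int) v ((m : Int) - (left : Int))] else [])
      ++ pvMs v left (m + 1) array_
  else []
termination_by array_.length - m

theorem pvDiff_mk (l n v d : Int) : pvDiff (pvMk l n v d) = d := rfl

theorem loop_eq_ms (v : Int) (left : Nat) (array_ : List Int) :
    ∀ k m, array_.length - m = k → left + 2 ≤ m → ∀ acc,
      get_best_case_loop v left m array_ acc = acc ++ pvMs v left m array_ := by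
  intro k
  induction k using Nat.strong_induction_on with
  | _ k ih =>
    intro m hk hm acc
    by_cases h : m < array_.length
    · rw [get_best_case_loop, pvMs, dif_pos h, dif_pos h]
      have hd : ((m : Int) - (left : Int)) ≠ 1 := by omega
      by_cases hv : array_.getD m 0 = v
      · simp only [if_pos hv, if_neg hd]
        rw [ih (array_.length - (m + 1)) (by omega) (m + 1) rfl (by omega)]
        simp
      · simp only [if_neg hv]
        rw [ih (array_.length - (m + 1)) (by omega) (m + 1) rfl (by omega)]
        simp
    · rw [get_best_case_loop, pvMs, dif_neg h, dif_neg h]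
      simp

theorem loop_start_eq_ms (v : Int) (left : Nat) (array_ : List Int) :
    get_best_case_loop v left (left + 1) array_ [] = pvMs v left (left + 1) array_ := by
  by_cases h : left + 1 < array_.length
  · rw [get_best_case_loop, pvMs, dif_pos h, dif_pos h]
    by_cases hv : array_.getD (left + 1) 0 = v
    · have hd : (((left + 1 : Nat)) : Int) - (left : Int) = 1 := by push_cast; ring
      simp only [if_pos hv, if_pos hd]
      rw [loop_eq_ms v left array_ _ (left + 2) rfl (by omega)]
    · simp only [if_neg hv]
      rw [loop_eq_ms v left array_ _ (left + 2) rfl (by omega)]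
  · rw [get_best_case_loop, pvMs, dif_neg h, dif_neg h]

theorem ms_diff_ge (v : Int) (left : Nat) (array_ : List Int) :
    ∀ k m, array_.length - m = k → ∀ e ∈ pvMs v left m array_,
      ((m : Int) - (left : Int)) ≤ pvDiff e := by
  intro k
  induction k using Nat.strong_induction_on with
  | _ k ih =>
    intro m hk e he
    by_cases h : m < array_.length
    · rw [pvMs, dif_pos h] at he
      rcases List.mem_append.1 he with h1 | h2
      · split at h1
        · rcases List.mem_singleton.1 h1 with rfl
          rw [pvDiff_mk]
        · exact absurd h1 List.not_mem_nil
      · have := ih (array_.length - (m + 1)) (by omega) (m + 1) rfl e h2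
        omega
    · rw [pvMs, dif_neg h] at he
      exact absurd he List.not_mem_nil

theorem fold_min_head (h : List (String × Int)) (l : List (List (String × Int)))
    (hb : ∀ e ∈ l, ¬ pvDiff e < pvDiff h) :
    l.foldl (fun prev e => if pvDiff e < pvDiff prev then e else prev) h = h := by
  induction l with
  | nil => rfl
  | cons x xs ih =>
    simp only [List.foldl_cons]
    rw [if_neg (hb x List.mem_cons_self)]
    exact ih (fun e he => hb e (List.mem_cons_of_mem _ he))

theorem number_ms_eq_first (v : Int) (left : Nat) (array_ : List Int) :
    ∀ k m, array_.length - m = k →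
      get_number_best_case (pvMs v left m array_) =
        (pvFirst array_ v m).map
          (fun j : Nat => pvMk (left : Int) (j : Int) v ((j : Int) - (left : Int))) := by
  intro k
  induction k using Nat.strong_induction_on with
  | _ k ih =>
    intro m hk
    by_cases h : m < array_.length
    · rw [pvMs, pvFirst, dif_pos h, dif_pos h]
      by_cases hv : array_.getD m 0 = v
      · simp only [if_pos hv, List.singleton_append, Option.map_some]
        simp only [get_number_best_case]
        rw [List.foldl_cons, if_neg (lt_irrefl _)]
        rw [fold_min_head]
        intro e he
        have := ms_diff_ge v left array_ _ (m + 1) rfl e he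
        rw [pvDiff_mk]
        omega
      · simp only [if_neg hv, List.nil_append]
        exact ih (array_.length - (m + 1)) (by omega) (m + 1) rfl
    · rw [pvMs, pvFirst, dif_neg h, dif_neg h]
      rfl

-- A's outer foldl with conditional append = filterMap
theorem foldl_opt (array_ : List Int) (l : List Nat) :
    ∀ acc : List (List (String × Int)),
      l.foldl
        (fun list_ index =>
          match get_best_case (array_.getD index 0) index (index + 1) array_ with
          | some best_case => list_ ++ [best_case]
          | none => list_) acc
        = acc ++ l.filterMap (fun index => get_best_case (array_.getD index 0) index (index + 1) array_) := by
  induction l with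
  | nil => intro acc; simp
  | cons x xs ih =>
    intro acc
    rw [List.foldl_cons, List.filterMap_cons]
    cases hx : get_best_case (array_.getD x 0) x (x + 1) array_ with
    | none => exact ih acc
    | some b => rw [ih (acc ++ [b])]; simp

theorem a_eq_spec (array_ : List Int) : get_all_best_case array_ = pvSpecOut array_ := by
  unfold get_all_best_case pvSpecOut
  rw [foldl_opt, List.nil_append]
  apply List.filterMap_congr
  intro i _
  unfold get_best_case pvSpecEntry
  rw [loop_start_eq_ms, number_ms_eq_first (array_.getD i 0) i array_ _ (i + 1) rfl]

-- the accumulator of pvAltLoop only collects appends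
theorem altLoop_acc (l : List Int) :
    ∀ idx seen res, pvAltLoop l idx seen res = res ++ pvAltLoop l idx seen [] := by
  induction l with
  | nil => intro idx seen res; simp [pvAltLoop]
  | cons v rest ih =>
    intro idx seen res
    rw [pvAltLoop, pvAltLoop]
    cases h : seen.get? v with
    | none =>
      exact ih _ _ res
    | some j =>
      simp only [List.nil_append]
      rw [ih _ _ (res ++ [pvMk idx j v (j - idx)]), ih _ _ [pvMk idx j v (j - idx)]]
      simp

-- the dict invariant: last_seen.get? v is v's first index ≥ m, cast to Int
theorem altLoop_spec (array_ : List Int) :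
    ∀ m, m ≤ array_.length →
    ∀ seen : PySem.Dict Int Int,
      (∀ v, seen.get? v = (pvFirst array_ v m).map Int.ofNat) →
      pvAltLoop (array_.take m).reverse ((m : Int) - 1) seen []
        = ((List.range m).filterMap (pvSpecEntry array_)).reverse := by
  intro m
  induction m with
  | zero => intro _ seen _; simp [pvAltLoop]
  | succ m ih =>
    intro hm seen hseen
    have hmlt : m < array_.length := by omega
    have htake : (array_.take (m + 1)).reverse = array_.getD m 0 :: (array_.take m).reverse := by
      rw [List.getD_eq_getElem _ _ hmlt, List.take_succ_eq_append_getElem hmlt]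
      simp
    have hidx : ((m + 1 : Nat) : Int) - 1 = (m : Int) := by push_cast; ring
    rw [htake, hidx, pvAltLoop, hseen (array_.getD m 0)]
    have hseen' : ∀ v, (seen.insert (array_.getD m 0) (m : Int)).get? v
        = (pvFirst array_ v m).map Int.ofNat := by
      intro v
      rw [PySem.Dict.get?_insert, pvFirst, dif_pos hmlt]
      by_cases hv : v = array_.getD m 0
      · rw [if_pos hv, if_pos hv.symm]
        simp
      · rw [if_neg hv, if_neg (fun hh => hv hh.symm), hseen v]
    rw [List.range_succ, List.filterMap_append, List.reverse_append]
    cases hf : pvFirst array_ (array_.getD m 0) (m + 1) with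
    | none =>
      simp only [Option.map_none]
      rw [ih (by omega) _ hseen']
      simp only [List.filterMap_cons, List.filterMap_nil, pvSpecEntry, hf, Option.map_none,
        List.reverse_nil, List.nil_append]
    | some j =>
      simp only [Option.map_some, List.nil_append]
      rw [altLoop_acc, ih (by omega) _ hseen']
      simp only [List.filterMap_cons, List.filterMap_nil, pvSpecEntry, hf, Option.map_some,
        List.reverse_cons, List.reverse_nil, List.nil_append, List.singleton_append, Int.ofNat_eq_natCast]
theorem b_eq_spec (array_ : List Int) : get_all_best_case_alt array_ = pvSpecOut array_ := by
  unfold get_all_best_case_alt pvSpecOut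
  have h0 : ∀ v, (PySem.Dict.empty : PySem.Dict Int Int).get? v
      = (pvFirst array_ v array_.length).map Int.ofNat := by
    intro v
    rw [pvFirst, dif_neg (by omega)]
    simp
  have h := altLoop_spec array_ array_.length (le_refl _) PySem.Dict.empty h0
  rw [List.take_length] at h
  rw [h, List.reverse_reverse]

-- ===== VERDICT (by name: the statement is the Claim_ definition above) =====
theorem get_all_best_case_spec : Claim_equal_get_all_best_case := by
  intro array_ _
  unfold Spec_get_all_best_case
  rw [a_eq_spec, b_eq_spec]
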